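-- pv_equiv track=rewrite | github.com/CNLarrylai/MB2-ML-trasnaltion | 提取一个文件夹的所有ID.py | replace_id_no_id
-- ===== SOURCE A (Python) =====
-- def replace_id_no_id(_string):
--     index_left = _string.index('=')
--     temp= _string[index_left + 1:].replace(" ","_")
--     if "," in temp:
--         temp = temp[:temp.index(",")]
--     for r in ((" ", "_"), ("'", "_"),(":", "_"),(")", "_"),("(", "_")):
--         temp = temp.replace(*r)
--         temp = temp.replace("\"","")
--         temp = temp.replace("\n", "")
--     return temp.lower()
-- ===== SOURCE B (Python) =====
-- def replace_id_no_id(_string):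
--     # one pass over the chars after '=': break at ',', translate, lowercase, accumulate
--     out = []
--     for ch in _string[_string.index('=') + 1:]:
--         if ch == ',':
--             break
--         elif ch in " ':)(":
--             out.append('_')
--         elif ch not in '"\n':
--             out.append(ch.lower())
--     return ''.join(out)
-- ===== Notes on version B (the rewrite author's own statement) =====
-- stated objective: alternative
-- what changed: A's staged pipeline (slice after '=', fifteen sequential full-string replace passes, guarded index/slice comma truncation, final lower) is replaced by one left-to-right pass with an accumulator over the chars after '=': break at the first ',', per character emit '_'/nothing/the lowered char.
import Mathlib
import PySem

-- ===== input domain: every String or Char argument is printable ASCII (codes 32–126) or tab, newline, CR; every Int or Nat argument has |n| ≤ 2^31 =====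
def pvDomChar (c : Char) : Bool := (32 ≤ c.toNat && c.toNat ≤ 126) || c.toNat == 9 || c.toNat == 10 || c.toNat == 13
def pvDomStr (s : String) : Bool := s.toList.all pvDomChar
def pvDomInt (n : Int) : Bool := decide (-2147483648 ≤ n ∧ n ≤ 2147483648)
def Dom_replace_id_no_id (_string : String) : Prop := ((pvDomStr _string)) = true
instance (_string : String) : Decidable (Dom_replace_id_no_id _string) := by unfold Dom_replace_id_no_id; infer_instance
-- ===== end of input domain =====

-- B replaces A's staged pipeline (slice after '=', 15 sequential full-string replace
-- passes, guarded comma truncation, final lower) by ONE left-to-right state-machine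
-- pass with an accumulator; alternative, not claimed faster.

-- ===== PORT A =====
def replace_id_no_id (_string : String) : String :=
  let cs := _string.toList
  -- index_left = _string.index('=')   (Pre_ guarantees '=' occurs, so find ≥ 0)
  let index_left := PySem.Chars.find cs ['=']
  -- temp = _string[index_left + 1:].replace(" ", "_")
  let temp := PySem.Chars.replace (PySem.List.slice cs (some (index_left + 1)) none) [' '] ['_']
  -- if "," in temp: temp = temp[:temp.index(",")]
  let temp := if PySem.Chars.isIn [','] temp
              then PySem.List.slice temp none (some (PySem.Chars.find temp [',']))
              else temp
  -- for r in ((" ","_"), ("'","_"), (":","_"), (")","_"), ("(","_")): three replaces each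
  let temp := [(' ', '_'), ('\'', '_'), (':', '_'), (')', '_'), ('(', '_')].foldl
    (fun t r =>
      let t := PySem.Chars.replace t [r.1] [r.2]
      let t := PySem.Chars.replace t ['"'] []
      PySem.Chars.replace t ['\n'] []) temp
  -- return temp.lower()
  String.ofList (PySem.Chars.lower temp)

-- ===== PORT B =====
-- Source B's loop: one pass with an accumulator over the chars after '=' —
-- break at ',', map " ':)(" to '_', drop '"' and '\n', else emit ch.lower().
def bLoop : List Char → List Char
  | [] => []
  | c :: t =>
      if c = ',' then []
      else if c = ' ' ∨ c = '\'' ∨ c = ':' ∨ c = ')' ∨ c = '(' then '_' :: bLoop t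
      else if c = '"' ∨ c = '\n' then bLoop t
      else PySem.Chars.lowerChar c :: bLoop t

def replace_id_no_id_alt (_string : String) : String :=
  let cs := _string.toList
  -- _string[_string.index('=') + 1:]  (Pre_ guarantees '=' occurs)
  String.ofList (bLoop (PySem.List.slice cs (some (PySem.Chars.find cs ['='] + 1)) none))

-- ===== PRECONDITION & SPEC =====
-- Pre_ excludes exactly the inputs with no '=' where A's _string.index('=') raises ValueError.
def Pre_replace_id_no_id (_string : String) : Prop := PySem.Str.isIn "=" _string = true
instance (_string : String) : Decidable (Pre_replace_id_no_id _string) := by unfold Pre_replace_id_no_id; infer_instance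
def pvWitness_replace_id_no_id : String := "id= A'B(c),rest"

def Spec_replace_id_no_id (_string : String) (out : String) : Prop := out = replace_id_no_id_alt _string
instance (_string : String) (out : String) : Decidable (Spec_replace_id_no_id _string out) := by unfold Spec_replace_id_no_id; infer_instance

-- ===== CLAIM (what is proved, stated in full; the proofs are below) =====
def Claim_equal_replace_id_no_id : Prop := ∀ (_string : String), Dom_replace_id_no_id _string → Pre_replace_id_no_id _string → Spec_replace_id_no_id _string (replace_id_no_id _string)
-- ===== LEMMAS AND PROOFS =====

-- the combined effect of A's per-character substitutions, as one map (proof-side only)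
def pvTr (c : Char) : List Char :=
  if c = ' ' ∨ c = '\'' ∨ c = ':' ∨ c = ')' ∨ c = '(' then ['_']
  else if c = '"' ∨ c = '\n' then [] else [c]

-- Python str.replace with a single-character pattern is a per-character flatMap.
theorem replace_go_singleton (a : Char) (new : List Char) :
    ∀ (fuel : Nat) (l acc : List Char), l.length ≤ fuel →
      PySem.Chars.replace.go [a] new fuel l acc
        = acc.reverse ++ l.flatMap (fun c => if c = a then new else [c]) := by
  intro fuel
  induction fuel with
  | zero => intro l acc h; cases l with
    | nil => simp [PySem.Chars.replace.go]
    | cons c t => simp at h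
  | succ n ih =>
    intro l acc h
    cases l with
    | nil => simp [PySem.Chars.replace.go]
    | cons c t =>
      by_cases hc : c = a
      · have hp : List.isPrefixOf [a] (c :: t) = true := by simp [List.isPrefixOf, hc]
        simp only [PySem.Chars.replace.go, hp, if_pos]
        rw [ih _ _ (by simpa using Nat.le_of_succ_le_succ h)]
        simp [hc]
      · have hp : List.isPrefixOf [a] (c :: t) = false := by
          simp [List.isPrefixOf]; intro h'; exact absurd h'.symm hc
        simp only [PySem.Chars.replace.go, hp, Bool.false_eq_true, if_false]
        rw [ih _ _ (by simpa using Nat.le_of_succ_le_succ h)]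
        simp [hc]

theorem replace_singleton (a : Char) (new l : List Char) :
    PySem.Chars.replace l [a] new = l.flatMap (fun c => if c = a then new else [c]) := by
  simp only [PySem.Chars.replace, List.isEmpty_cons, Bool.false_eq_true, if_false]
  exact replace_go_singleton a new l.length l [] (le_refl _)

-- prefix up to the FIRST occurrence of a is takeWhile (· ≠ a)
theorem take_eq_takeWhile_ne (a : Char) :
    ∀ (l : List Char) (k : Nat), l[k]? = some a → (∀ i, i < k → l[i]? ≠ some a) →
      l.take k = l.takeWhile (· ≠ a) := by
  intro l
  induction l with
  | nil => intro k h _; simp at h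
  | cons c t ih =>
    intro k hk hlt
    cases k with
    | zero => simp at hk; simp [hk]
    | succ m =>
      have hc : c ≠ a := by
        intro h; exact hlt 0 (Nat.succ_pos m) (by simp [h])
      simp only [List.take_succ_cons, List.takeWhile_cons, hc,
        ne_eq, not_false_eq_true, decide_true, if_pos]
      rw [ih m (by simpa using hk) (fun i hi => by
        have := hlt (i+1) (Nat.succ_lt_succ hi); simpa using this)]

-- A's guarded comma truncation equals takeWhile (· ≠ ',')
theorem trunc_eq_takeWhile (l : List Char) :
    (if PySem.Chars.isIn [','] l
     then PySem.List.slice l none (some (PySem.Chars.find l [',']))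
     else l) = l.takeWhile (· ≠ ',') := by
  by_cases h : PySem.Chars.isIn [','] l = true
  · have hfind : 0 ≤ PySem.Chars.find l [','] := by
      rw [PySem.Chars.find_nonneg_iff]
      exact (PySem.Chars.isIn_iff_infix _ _).mp h
    have hspec := PySem.Chars.find_spec (s := l) (sub := [',']) hfind
    set k := (PySem.Chars.find l [',']).toNat with hk
    rw [if_pos h, PySem.List.slice_to _ hfind, ← hk]
    refine take_eq_takeWhile_ne ',' l k ?_ ?_
    · rcases hspec.1 with ⟨suf, hsuf⟩
      have hd : l.drop k = ',' :: suf := by simpa using hsuf.symm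
      have : l[k + 0]? = some ',' := by rw [← List.getElem?_drop, hd]; simp
      simpa using this
    · intro i hi hgi
      have hi' : i < l.length := by
        by_contra hle
        simp [List.getElem?_eq_none (Nat.le_of_not_lt hle)] at hgi
      have hgi' : l[i] = ',' := by
        rcases List.getElem?_eq_some_iff.mp hgi with ⟨_, e⟩; exact e
      exact hspec.2 i hi ⟨l.drop (i+1), by
        rw [List.drop_eq_getElem_cons hi', hgi']; rfl⟩
  · rw [if_neg h]
    have hnot : ',' ∉ l := by
      intro hm
      rcases List.mem_iff_append.mp hm with ⟨s1, s2, rfl⟩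
      exact h ((PySem.Chars.isIn_iff_infix _ _).mpr ⟨s1, s2, by simp⟩)
    exact (List.takeWhile_eq_self_iff.mpr (fun c hc => by
      simp only [ne_eq, decide_eq_true_eq]
      intro hceq; exact hnot (hceq ▸ hc))).symm

theorem sp_no_comma : ∀ c, c ≠ ',' → ∀ x ∈ (if c = ' ' then ['_'] else [c]), x ≠ ',' := by
  intro c hc x hx
  split_ifs at hx <;> simp_all

-- comma truncation commutes with a per-character flatMap that fixes ',' and never produces it
theorem takeWhile_flatMap_comma (f : Char → List Char) (h1 : f ',' = [','])
    (h2 : ∀ c, c ≠ ',' → ∀ x ∈ f c, x ≠ ',') (l : List Char) :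
    (l.flatMap f).takeWhile (· ≠ ',') = (l.takeWhile (· ≠ ',')).flatMap f := by
  induction l with
  | nil => simp
  | cons c t ih =>
    by_cases hc : c = ','
    · subst hc
      simp [List.flatMap_cons, h1]
    · simp only [List.flatMap_cons, List.takeWhile_cons, hc, ne_eq,
        not_false_eq_true, decide_true, if_pos]
      rw [List.takeWhile_append_of_pos (fun x hx => by simpa using h2 c hc x hx), ih]

-- A's whole post-slice pipeline, characterised as one per-character flatMap
theorem A_pipeline (l : List Char) :
    PySem.Chars.lower
      ([(' ', '_'), ('\'', '_'), (':', '_'), (')', '_'), ('(', '_')].foldl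
        (fun t r =>
          let t := PySem.Chars.replace t [r.1] [r.2]
          let t := PySem.Chars.replace t ['"'] []
          PySem.Chars.replace t ['\n'] [])
        (if PySem.Chars.isIn [','] (PySem.Chars.replace l [' '] ['_'])
         then PySem.List.slice (PySem.Chars.replace l [' '] ['_']) none
                (some (PySem.Chars.find (PySem.Chars.replace l [' '] ['_']) [',']))
         else PySem.Chars.replace l [' '] ['_']))
    = PySem.Chars.lower ((l.takeWhile (· ≠ ',')).flatMap pvTr) := by
  simp only [replace_singleton, trunc_eq_takeWhile, List.foldl_cons, List.foldl_nil]
  rw [takeWhile_flatMap_comma _ (by simp) sp_no_comma]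
  simp only [List.flatMap_assoc]
  refine congrArg PySem.Chars.lower (List.flatMap_congr fun c _ => ?_)
  by_cases h1 : c = ' ' <;> by_cases h2 : c = '\'' <;> by_cases h3 : c = ':' <;>
    by_cases h4 : c = ')' <;> by_cases h5 : c = '(' <;> by_cases h6 : c = '"' <;>
    by_cases h7 : c = '\n' <;>
    simp [pvTr, h1, h2, h3, h4, h5, h6, h7]

-- B's loop = lower of (truncate-at-comma then translate)
theorem bLoop_eq (t : List Char) :
    bLoop t = PySem.Chars.lower ((t.takeWhile (· ≠ ',')).flatMap pvTr) := by
  induction t with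
  | nil => simp [bLoop, PySem.Chars.lower]
  | cons c t ih =>
    by_cases hc : c = ','
    · subst hc; simp [bLoop, PySem.Chars.lower]
    · simp only [bLoop, if_neg, List.takeWhile_cons, ne_eq, hc, not_false_eq_true,
        decide_true, if_pos, List.flatMap_cons]
      by_cases hg : c = ' ' ∨ c = '\'' ∨ c = ':' ∨ c = ')' ∨ c = '(' <;>
        by_cases hd : c = '"' ∨ c = '\n' <;>
        simp_all [pvTr, PySem.Chars.lower, PySem.Chars.lowerChar] <;> decide

-- ===== VERDICT (by name: the statements are the Claim_ definitions above) =====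
theorem replace_id_no_id_spec : Claim_equal_replace_id_no_id := by
  intro s _ hpre
  unfold Spec_replace_id_no_id replace_id_no_id replace_id_no_id_alt
  dsimp only
  have hinf : ['='] <:+: s.toList := by
    simpa using (PySem.Str.isIn_iff_infix _ _).mp hpre
  have hfind : 0 ≤ PySem.Chars.find s.toList ['='] := by
    rw [PySem.Chars.find_nonneg_iff]; exact hinf
  have hspec := PySem.Chars.find_spec (s := s.toList) (sub := ['=']) hfind
  set k := (PySem.Chars.find s.toList ['=']).toNat with hk
  rcases hspec.1 with ⟨suf, hsuf⟩
  have hd : s.toList.drop k = '=' :: suf := by simpa using hsuf.symm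
  have hslice : PySem.List.slice s.toList (some (PySem.Chars.find s.toList ['='] + 1)) none = suf := by
    rw [PySem.List.slice_from _ (by omega)]
    have hto : (PySem.Chars.find s.toList ['='] + 1).toNat = k + 1 := by omega
    rw [hto]
    have : s.toList.drop (k + 1) = (s.toList.drop k).drop 1 := by
      rw [List.drop_drop]
    rw [this, hd]; rfl
  rw [hslice, A_pipeline, ← bLoop_eq]
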